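-- pv_equiv track=rewrite | github.com/DaveGerson/agent-baton | agent_baton/core/engine/cost_estimator.py | role_baseline_tokens
-- ===== SOURCE A (Python) =====
-- _ROLE_BASELINE_TOKENS: dict[str, int] = {
--     "architect": 8_000,
--     "code-reviewer": 8_000,
--     "auditor": 6_000,
--     "security-reviewer": 6_000,
--     "backend-engineer": 5_000,
--     "frontend-engineer": 5_000,
--     "test-engineer": 5_000,
-- }
--
-- _DEFAULT_BASELINE_TOKENS = 4_000
--
-- def role_baseline_tokens(agent_name: str) -> int:
--     """Return the role token baseline for *agent_name*.
--
--     Matches by prefix so suffixed names (``backend-engineer--python``)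
--     still resolve to their family baseline.
--     """
--     if not agent_name:
--         return _DEFAULT_BASELINE_TOKENS
--     lower = agent_name.lower()
--     for role, baseline in _ROLE_BASELINE_TOKENS.items():
--         if lower.startswith(role):
--             return baseline
--     return _DEFAULT_BASELINE_TOKENS
-- ===== SOURCE B (Python) =====
-- _ROLE_BASELINE_TOKENS: dict[str, int] = {
--     "architect": 8_000,
--     "code-reviewer": 8_000,
--     "auditor": 6_000,
--     "security-reviewer": 6_000,
--     "backend-engineer": 5_000,
--     "frontend-engineer": 5_000,
--     "test-engineer": 5_000,
-- }
--
-- _DEFAULT_BASELINE_TOKENS = 4_000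
--
-- _MAX_ROLE_LEN = max(map(len, _ROLE_BASELINE_TOKENS))
--
-- def role_baseline_tokens(agent_name: str) -> int:
--     """Longest-growing prefix lookup: probe the dict with each prefix of the
--     lowercased name instead of scanning the dict entries; correct because no
--     role key is a prefix of another, so at most one prefix can be a key."""
--     lower = agent_name.lower()
--     for i in range(1, min(len(lower), _MAX_ROLE_LEN) + 1):
--         baseline = _ROLE_BASELINE_TOKENS.get(lower[:i])
--         if baseline is not None:
--             return baseline
--     return _DEFAULT_BASELINE_TOKENS
-- ===== Notes on version B (the rewrite author's own statement) =====
-- stated objective: alternative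
-- what changed: Instead of scanning every dict entry with startswith, B loops over the growing prefixes of the lowercased name (i = 1..len) and probes the dict directly with each prefix, returning the first hit; correct because no role key is a prefix of another, so at most one prefix can be a key.
import Mathlib
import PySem

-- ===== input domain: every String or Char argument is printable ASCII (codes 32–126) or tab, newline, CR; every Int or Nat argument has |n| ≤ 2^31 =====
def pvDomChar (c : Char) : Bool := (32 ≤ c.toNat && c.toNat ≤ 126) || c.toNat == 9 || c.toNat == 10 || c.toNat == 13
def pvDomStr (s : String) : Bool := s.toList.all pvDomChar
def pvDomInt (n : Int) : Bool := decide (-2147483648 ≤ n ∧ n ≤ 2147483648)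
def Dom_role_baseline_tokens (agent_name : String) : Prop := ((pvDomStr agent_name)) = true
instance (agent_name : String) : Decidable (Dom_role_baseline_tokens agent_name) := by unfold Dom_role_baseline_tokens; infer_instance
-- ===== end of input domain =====

-- B replaces A's scan of the role dict with startswith by a loop over the growing
-- prefixes of the lowercased name, probing the dict with each prefix and returning
-- the first hit; equivalent because no role key is a prefix of another.

-- ===== PORT A =====
def pvRoleBaselines : List (String × Int) :=
  [("architect", 8000), ("code-reviewer", 8000), ("auditor", 6000),
   ("security-reviewer", 6000), ("backend-engineer", 5000),
   ("frontend-engineer", 5000), ("test-engineer", 5000)]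

def pvDefaultBaseline : Int := 4000

def pvScanRoles (lower : String) : List (String × Int) → Int
  | [] => pvDefaultBaseline
  | (role, baseline) :: rest =>
      if PySem.Str.startswith lower role then baseline else pvScanRoles lower rest

def role_baseline_tokens (agent_name : String) : Int :=
  if agent_name = "" then pvDefaultBaseline
  else pvScanRoles (PySem.Str.lower agent_name) pvRoleBaselines

-- ===== PORT B =====
def pvRoleDict : PySem.Dict String Int :=
  PySem.Dict.mk
    [("architect", 8000), ("code-reviewer", 8000), ("auditor", 6000),
     ("security-reviewer", 6000), ("backend-engineer", 5000),
     ("frontend-engineer", 5000), ("test-engineer", 5000)]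

def pvMaxRoleLen : Int :=
  (PySem.List.max? ((PySem.Dict.keys pvRoleDict).map PySem.Str.len) (fun x => x)).getD 0
  -- max(map(len, dict)) — the dict is a non-empty literal, so max never raises; getD 0 is unreachable

-- the loop 'for i in range(1, min(len(lower), _MAX_ROLE_LEN) + 1)' with early return on a dict hit
def pvProbePrefixes (lower : String) : List Int → Int
  | [] => pvDefaultBaseline
  | i :: rest =>
      match PySem.Dict.get? pvRoleDict (PySem.Str.slice lower none (some i)) with
      | some baseline => baseline
      | none => pvProbePrefixes lower rest

def role_baseline_tokens_alt (agent_name : String) : Int :=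
  let lower := PySem.Str.lower agent_name
  pvProbePrefixes lower (PySem.List.pyRange 1 (min (PySem.Str.len lower) pvMaxRoleLen + 1) 1)

-- ===== PRECONDITION & SPEC =====
def Spec_role_baseline_tokens (agent_name : String) (out : Int) : Prop := out = role_baseline_tokens_alt agent_name
instance (agent_name : String) (out : Int) : Decidable (Spec_role_baseline_tokens agent_name out) := by unfold Spec_role_baseline_tokens; infer_instance

-- ===== CLAIM (what is proved, stated in full; the proofs are below) =====
def Claim_equal_role_baseline_tokens : Prop := ∀ (agent_name : String), Dom_role_baseline_tokens agent_name → Spec_role_baseline_tokens agent_name (role_baseline_tokens agent_name)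

-- ===== LEMMAS AND PROOFS =====

-- a string m equals the prefix slice l[:i] iff m is a prefix of l of length i
theorem pv_beq_slice_iff (m l : String) (i : Int) (h1 : 1 ≤ i) (h2 : i ≤ (l.toList.length : Int)) :
    (m == PySem.Str.slice l none (some i)) = true ↔
      (m.toList <+: l.toList ∧ (m.toList.length : Int) = i) := by
  have hs : (PySem.Str.slice l none (some i)).toList = l.toList.take i.toNat := by
    rw [PySem.Str.toList_slice, PySem.Chars.slice_eq_listSlice, PySem.List.slice_to _ (by omega)]
  rw [beq_iff_eq, ← String.toList_inj, hs]
  constructor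
  · intro he
    refine ⟨he ▸ List.take_prefix _ _, ?_⟩
    have : m.toList.length = min i.toNat l.toList.length := by rw [he, List.length_take]
    omega
  · rintro ⟨hp, hlen⟩
    have : m.toList = l.toList.take m.toList.length := List.prefix_iff_eq_take.mp hp
    rw [this]
    congr 1
    omega

theorem pv_not_beq_slice (m l : String) (i : Int) (h1 : 1 ≤ i) (h2 : i ≤ (l.toList.length : Int))
    (hm : ¬ m.toList <+: l.toList) :
    (m == PySem.Str.slice l none (some i)) = false := by
  rw [Bool.eq_false_iff]
  intro h
  exact hm ((pv_beq_slice_iff m l i h1 h2).mp h).1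

-- when k is a prefix of l, any other non-comparable key cannot equal a prefix slice of l
theorem pv_not_beq_of_other (m k l : String) (i : Int) (h1 : 1 ≤ i) (h2 : i ≤ (l.toList.length : Int))
    (hk : k.toList <+: l.toList) (hmk : ¬ m.toList <+: k.toList) (hkm : ¬ k.toList <+: m.toList) :
    (m == PySem.Str.slice l none (some i)) = false := by
  rw [Bool.eq_false_iff]
  intro h
  have hm := ((pv_beq_slice_iff m l i h1 h2).mp h).1
  rcases List.prefix_or_prefix_of_prefix hm hk with h' | h'
  · exact hmk h'
  · exact hkm h'

theorem pv_beq_slice_self (k l : String) (i : Int) (h1 : 1 ≤ i) (h2 : i ≤ (l.toList.length : Int))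
    (hk : k.toList <+: l.toList) :
    (k == PySem.Str.slice l none (some i)) = decide ((k.toList.length : Int) = i) := by
  by_cases hi : (k.toList.length : Int) = i
  · simp only [hi, decide_true]
    exact (pv_beq_slice_iff k l i h1 h2).mpr ⟨hk, hi⟩
  · simp only [hi, decide_false]
    rw [Bool.eq_false_iff]
    intro h
    exact hi ((pv_beq_slice_iff k l i h1 h2).mp h).2

-- probe loop: if no prefix hits the dict, the loop falls through to the default
theorem pv_probe_none (l : String) (is : List Int)
    (H : ∀ i ∈ is, PySem.Dict.get? pvRoleDict (PySem.Str.slice l none (some i)) = none) :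
    pvProbePrefixes l is = pvDefaultBaseline := by
  induction is with
  | nil => rfl
  | cons i rest ih =>
      simp only [pvProbePrefixes, H i (List.mem_cons_self)]
      exact ih (fun j hj => H j (List.mem_cons_of_mem _ hj))

-- probe loop: if exactly the prefix of length tgt hits (with value v), the loop returns v
theorem pv_probe_hit (l : String) (tgt v : Int) (is : List Int)
    (H : ∀ i ∈ is, PySem.Dict.get? pvRoleDict (PySem.Str.slice l none (some i)) =
        if tgt = i then some v else none)
    (hmem : tgt ∈ is) :
    pvProbePrefixes l is = v := by
  induction is with
  | nil => cases hmem
  | cons i rest ih =>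
      by_cases hi : tgt = i
      · simp only [pvProbePrefixes, H i (List.mem_cons_self), if_pos hi]
      · simp only [pvProbePrefixes, H i (List.mem_cons_self), if_neg hi]
        refine ih (fun j hj => H j (List.mem_cons_of_mem _ hj)) ?_
        rcases List.mem_cons.mp hmem with h | h
        · exact absurd h hi
        · exact h

-- per-key hit characterisations: when key k is a prefix of l, the dict lookup on l[:i]
-- returns k's value exactly at i = |k| and none otherwise
theorem pv_hit_architect (l : String) (i : Int) (h1 : 1 ≤ i) (h2 : i ≤ (l.toList.length : Int))
    (hk : "architect".toList <+: l.toList) :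
    PySem.Dict.get? pvRoleDict (PySem.Str.slice l none (some i)) =
      if (("architect".toList.length : Int)) = i then some 8000 else none := by
  have hself := pv_beq_slice_self "architect" l i h1 h2 hk
  by_cases hi : (("architect".toList.length : Int)) = i
  · simp only [hi, decide_true] at hself
    simp [pvRoleDict, PySem.Dict.get?, List.find?_cons, hself, hi,
      pv_not_beq_of_other "code-reviewer" "architect" l i h1 h2 hk (by decide) (by decide),
      pv_not_beq_of_other "auditor" "architect" l i h1 h2 hk (by decide) (by decide),
      pv_not_beq_of_other "security-reviewer" "architect" l i h1 h2 hk (by decide) (by decide),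
      pv_not_beq_of_other "backend-engineer" "architect" l i h1 h2 hk (by decide) (by decide),
      pv_not_beq_of_other "frontend-engineer" "architect" l i h1 h2 hk (by decide) (by decide),
      pv_not_beq_of_other "test-engineer" "architect" l i h1 h2 hk (by decide) (by decide)]
    rw [← hi]; decide
  · simp only [hi, decide_false] at hself
    simp [pvRoleDict, PySem.Dict.get?, List.find?_cons, hself, hi,
      pv_not_beq_of_other "code-reviewer" "architect" l i h1 h2 hk (by decide) (by decide),
      pv_not_beq_of_other "auditor" "architect" l i h1 h2 hk (by decide) (by decide),
      pv_not_beq_of_other "security-reviewer" "architect" l i h1 h2 hk (by decide) (by decide),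
      pv_not_beq_of_other "backend-engineer" "architect" l i h1 h2 hk (by decide) (by decide),
      pv_not_beq_of_other "frontend-engineer" "architect" l i h1 h2 hk (by decide) (by decide),
      pv_not_beq_of_other "test-engineer" "architect" l i h1 h2 hk (by decide) (by decide)]
    exact fun h => hi (by rw [← h]; decide)

theorem pv_hit_code_reviewer (l : String) (i : Int) (h1 : 1 ≤ i) (h2 : i ≤ (l.toList.length : Int))
    (hk : "code-reviewer".toList <+: l.toList) :
    PySem.Dict.get? pvRoleDict (PySem.Str.slice l none (some i)) =
      if (("code-reviewer".toList.length : Int)) = i then some 8000 else none := by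
  have hself := pv_beq_slice_self "code-reviewer" l i h1 h2 hk
  by_cases hi : (("code-reviewer".toList.length : Int)) = i
  · simp only [hi, decide_true] at hself
    simp [pvRoleDict, PySem.Dict.get?, List.find?_cons, hself, hi,
      pv_not_beq_of_other "architect" "code-reviewer" l i h1 h2 hk (by decide) (by decide),
      pv_not_beq_of_other "auditor" "code-reviewer" l i h1 h2 hk (by decide) (by decide),
      pv_not_beq_of_other "security-reviewer" "code-reviewer" l i h1 h2 hk (by decide) (by decide),
      pv_not_beq_of_other "backend-engineer" "code-reviewer" l i h1 h2 hk (by decide) (by decide),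
      pv_not_beq_of_other "frontend-engineer" "code-reviewer" l i h1 h2 hk (by decide) (by decide),
      pv_not_beq_of_other "test-engineer" "code-reviewer" l i h1 h2 hk (by decide) (by decide)]
    rw [← hi]; decide
  · simp only [hi, decide_false] at hself
    simp [pvRoleDict, PySem.Dict.get?, List.find?_cons, hself, hi,
      pv_not_beq_of_other "architect" "code-reviewer" l i h1 h2 hk (by decide) (by decide),
      pv_not_beq_of_other "auditor" "code-reviewer" l i h1 h2 hk (by decide) (by decide),
      pv_not_beq_of_other "security-reviewer" "code-reviewer" l i h1 h2 hk (by decide) (by decide),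
      pv_not_beq_of_other "backend-engineer" "code-reviewer" l i h1 h2 hk (by decide) (by decide),
      pv_not_beq_of_other "frontend-engineer" "code-reviewer" l i h1 h2 hk (by decide) (by decide),
      pv_not_beq_of_other "test-engineer" "code-reviewer" l i h1 h2 hk (by decide) (by decide)]
    exact fun h => hi (by rw [← h]; decide)

theorem pv_hit_auditor (l : String) (i : Int) (h1 : 1 ≤ i) (h2 : i ≤ (l.toList.length : Int))
    (hk : "auditor".toList <+: l.toList) :
    PySem.Dict.get? pvRoleDict (PySem.Str.slice l none (some i)) =
      if (("auditor".toList.length : Int)) = i then some 6000 else none := by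
  have hself := pv_beq_slice_self "auditor" l i h1 h2 hk
  by_cases hi : (("auditor".toList.length : Int)) = i
  · simp only [hi, decide_true] at hself
    simp [pvRoleDict, PySem.Dict.get?, List.find?_cons, hself, hi,
      pv_not_beq_of_other "architect" "auditor" l i h1 h2 hk (by decide) (by decide),
      pv_not_beq_of_other "code-reviewer" "auditor" l i h1 h2 hk (by decide) (by decide),
      pv_not_beq_of_other "security-reviewer" "auditor" l i h1 h2 hk (by decide) (by decide),
      pv_not_beq_of_other "backend-engineer" "auditor" l i h1 h2 hk (by decide) (by decide),
      pv_not_beq_of_other "frontend-engineer" "auditor" l i h1 h2 hk (by decide) (by decide),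
      pv_not_beq_of_other "test-engineer" "auditor" l i h1 h2 hk (by decide) (by decide)]
    rw [← hi]; decide
  · simp only [hi, decide_false] at hself
    simp [pvRoleDict, PySem.Dict.get?, List.find?_cons, hself, hi,
      pv_not_beq_of_other "architect" "auditor" l i h1 h2 hk (by decide) (by decide),
      pv_not_beq_of_other "code-reviewer" "auditor" l i h1 h2 hk (by decide) (by decide),
      pv_not_beq_of_other "security-reviewer" "auditor" l i h1 h2 hk (by decide) (by decide),
      pv_not_beq_of_other "backend-engineer" "auditor" l i h1 h2 hk (by decide) (by decide),
      pv_not_beq_of_other "frontend-engineer" "auditor" l i h1 h2 hk (by decide) (by decide),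
      pv_not_beq_of_other "test-engineer" "auditor" l i h1 h2 hk (by decide) (by decide)]
    exact fun h => hi (by rw [← h]; decide)

theorem pv_hit_security_reviewer (l : String) (i : Int) (h1 : 1 ≤ i) (h2 : i ≤ (l.toList.length : Int))
    (hk : "security-reviewer".toList <+: l.toList) :
    PySem.Dict.get? pvRoleDict (PySem.Str.slice l none (some i)) =
      if (("security-reviewer".toList.length : Int)) = i then some 6000 else none := by
  have hself := pv_beq_slice_self "security-reviewer" l i h1 h2 hk
  by_cases hi : (("security-reviewer".toList.length : Int)) = i
  · simp only [hi, decide_true] at hself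
    simp [pvRoleDict, PySem.Dict.get?, List.find?_cons, hself, hi,
      pv_not_beq_of_other "architect" "security-reviewer" l i h1 h2 hk (by decide) (by decide),
      pv_not_beq_of_other "code-reviewer" "security-reviewer" l i h1 h2 hk (by decide) (by decide),
      pv_not_beq_of_other "auditor" "security-reviewer" l i h1 h2 hk (by decide) (by decide),
      pv_not_beq_of_other "backend-engineer" "security-reviewer" l i h1 h2 hk (by decide) (by decide),
      pv_not_beq_of_other "frontend-engineer" "security-reviewer" l i h1 h2 hk (by decide) (by decide),
      pv_not_beq_of_other "test-engineer" "security-reviewer" l i h1 h2 hk (by decide) (by decide)]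
    rw [← hi]; decide
  · simp only [hi, decide_false] at hself
    simp [pvRoleDict, PySem.Dict.get?, List.find?_cons, hself, hi,
      pv_not_beq_of_other "architect" "security-reviewer" l i h1 h2 hk (by decide) (by decide),
      pv_not_beq_of_other "code-reviewer" "security-reviewer" l i h1 h2 hk (by decide) (by decide),
      pv_not_beq_of_other "auditor" "security-reviewer" l i h1 h2 hk (by decide) (by decide),
      pv_not_beq_of_other "backend-engineer" "security-reviewer" l i h1 h2 hk (by decide) (by decide),
      pv_not_beq_of_other "frontend-engineer" "security-reviewer" l i h1 h2 hk (by decide) (by decide),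
      pv_not_beq_of_other "test-engineer" "security-reviewer" l i h1 h2 hk (by decide) (by decide)]
    exact fun h => hi (by rw [← h]; decide)

theorem pv_hit_backend_engineer (l : String) (i : Int) (h1 : 1 ≤ i) (h2 : i ≤ (l.toList.length : Int))
    (hk : "backend-engineer".toList <+: l.toList) :
    PySem.Dict.get? pvRoleDict (PySem.Str.slice l none (some i)) =
      if (("backend-engineer".toList.length : Int)) = i then some 5000 else none := by
  have hself := pv_beq_slice_self "backend-engineer" l i h1 h2 hk
  by_cases hi : (("backend-engineer".toList.length : Int)) = i
  · simp only [hi, decide_true] at hself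
    simp [pvRoleDict, PySem.Dict.get?, List.find?_cons, hself, hi,
      pv_not_beq_of_other "architect" "backend-engineer" l i h1 h2 hk (by decide) (by decide),
      pv_not_beq_of_other "code-reviewer" "backend-engineer" l i h1 h2 hk (by decide) (by decide),
      pv_not_beq_of_other "auditor" "backend-engineer" l i h1 h2 hk (by decide) (by decide),
      pv_not_beq_of_other "security-reviewer" "backend-engineer" l i h1 h2 hk (by decide) (by decide),
      pv_not_beq_of_other "frontend-engineer" "backend-engineer" l i h1 h2 hk (by decide) (by decide),
      pv_not_beq_of_other "test-engineer" "backend-engineer" l i h1 h2 hk (by decide) (by decide)]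
    rw [← hi]; decide
  · simp only [hi, decide_false] at hself
    simp [pvRoleDict, PySem.Dict.get?, List.find?_cons, hself, hi,
      pv_not_beq_of_other "architect" "backend-engineer" l i h1 h2 hk (by decide) (by decide),
      pv_not_beq_of_other "code-reviewer" "backend-engineer" l i h1 h2 hk (by decide) (by decide),
      pv_not_beq_of_other "auditor" "backend-engineer" l i h1 h2 hk (by decide) (by decide),
      pv_not_beq_of_other "security-reviewer" "backend-engineer" l i h1 h2 hk (by decide) (by decide),
      pv_not_beq_of_other "frontend-engineer" "backend-engineer" l i h1 h2 hk (by decide) (by decide),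
      pv_not_beq_of_other "test-engineer" "backend-engineer" l i h1 h2 hk (by decide) (by decide)]
    exact fun h => hi (by rw [← h]; decide)

theorem pv_hit_frontend_engineer (l : String) (i : Int) (h1 : 1 ≤ i) (h2 : i ≤ (l.toList.length : Int))
    (hk : "frontend-engineer".toList <+: l.toList) :
    PySem.Dict.get? pvRoleDict (PySem.Str.slice l none (some i)) =
      if (("frontend-engineer".toList.length : Int)) = i then some 5000 else none := by
  have hself := pv_beq_slice_self "frontend-engineer" l i h1 h2 hk
  by_cases hi : (("frontend-engineer".toList.length : Int)) = i
  · simp only [hi, decide_true] at hself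
    simp [pvRoleDict, PySem.Dict.get?, List.find?_cons, hself, hi,
      pv_not_beq_of_other "architect" "frontend-engineer" l i h1 h2 hk (by decide) (by decide),
      pv_not_beq_of_other "code-reviewer" "frontend-engineer" l i h1 h2 hk (by decide) (by decide),
      pv_not_beq_of_other "auditor" "frontend-engineer" l i h1 h2 hk (by decide) (by decide),
      pv_not_beq_of_other "security-reviewer" "frontend-engineer" l i h1 h2 hk (by decide) (by decide),
      pv_not_beq_of_other "backend-engineer" "frontend-engineer" l i h1 h2 hk (by decide) (by decide),
      pv_not_beq_of_other "test-engineer" "frontend-engineer" l i h1 h2 hk (by decide) (by decide)]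
    rw [← hi]; decide
  · simp only [hi, decide_false] at hself
    simp [pvRoleDict, PySem.Dict.get?, List.find?_cons, hself, hi,
      pv_not_beq_of_other "architect" "frontend-engineer" l i h1 h2 hk (by decide) (by decide),
      pv_not_beq_of_other "code-reviewer" "frontend-engineer" l i h1 h2 hk (by decide) (by decide),
      pv_not_beq_of_other "auditor" "frontend-engineer" l i h1 h2 hk (by decide) (by decide),
      pv_not_beq_of_other "security-reviewer" "frontend-engineer" l i h1 h2 hk (by decide) (by decide),
      pv_not_beq_of_other "backend-engineer" "frontend-engineer" l i h1 h2 hk (by decide) (by decide),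
      pv_not_beq_of_other "test-engineer" "frontend-engineer" l i h1 h2 hk (by decide) (by decide)]
    exact fun h => hi (by rw [← h]; decide)

theorem pv_hit_test_engineer (l : String) (i : Int) (h1 : 1 ≤ i) (h2 : i ≤ (l.toList.length : Int))
    (hk : "test-engineer".toList <+: l.toList) :
    PySem.Dict.get? pvRoleDict (PySem.Str.slice l none (some i)) =
      if (("test-engineer".toList.length : Int)) = i then some 5000 else none := by
  have hself := pv_beq_slice_self "test-engineer" l i h1 h2 hk
  by_cases hi : (("test-engineer".toList.length : Int)) = i
  · simp only [hi, decide_true] at hself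
    simp [pvRoleDict, PySem.Dict.get?, List.find?_cons, hself, hi,
      pv_not_beq_of_other "architect" "test-engineer" l i h1 h2 hk (by decide) (by decide),
      pv_not_beq_of_other "code-reviewer" "test-engineer" l i h1 h2 hk (by decide) (by decide),
      pv_not_beq_of_other "auditor" "test-engineer" l i h1 h2 hk (by decide) (by decide),
      pv_not_beq_of_other "security-reviewer" "test-engineer" l i h1 h2 hk (by decide) (by decide),
      pv_not_beq_of_other "backend-engineer" "test-engineer" l i h1 h2 hk (by decide) (by decide),
      pv_not_beq_of_other "frontend-engineer" "test-engineer" l i h1 h2 hk (by decide) (by decide)]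
    rw [← hi]; decide
  · simp only [hi, decide_false] at hself
    simp [pvRoleDict, PySem.Dict.get?, List.find?_cons, hself, hi,
      pv_not_beq_of_other "architect" "test-engineer" l i h1 h2 hk (by decide) (by decide),
      pv_not_beq_of_other "code-reviewer" "test-engineer" l i h1 h2 hk (by decide) (by decide),
      pv_not_beq_of_other "auditor" "test-engineer" l i h1 h2 hk (by decide) (by decide),
      pv_not_beq_of_other "security-reviewer" "test-engineer" l i h1 h2 hk (by decide) (by decide),
      pv_not_beq_of_other "backend-engineer" "test-engineer" l i h1 h2 hk (by decide) (by decide),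
      pv_not_beq_of_other "frontend-engineer" "test-engineer" l i h1 h2 hk (by decide) (by decide)]
    exact fun h => hi (by rw [← h]; decide)

theorem pv_hit_none (l : String) (i : Int) (h1 : 1 ≤ i) (h2 : i ≤ (l.toList.length : Int))
    (n1 : ¬ "architect".toList <+: l.toList)
    (n2 : ¬ "code-reviewer".toList <+: l.toList)
    (n3 : ¬ "auditor".toList <+: l.toList)
    (n4 : ¬ "security-reviewer".toList <+: l.toList)
    (n5 : ¬ "backend-engineer".toList <+: l.toList)
    (n6 : ¬ "frontend-engineer".toList <+: l.toList)
    (n7 : ¬ "test-engineer".toList <+: l.toList) :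
    PySem.Dict.get? pvRoleDict (PySem.Str.slice l none (some i)) = none := by
  simp [pvRoleDict, PySem.Dict.get?,
    pv_not_beq_slice "architect" l i h1 h2 n1,
    pv_not_beq_slice "code-reviewer" l i h1 h2 n2,
    pv_not_beq_slice "auditor" l i h1 h2 n3,
    pv_not_beq_slice "security-reviewer" l i h1 h2 n4,
    pv_not_beq_slice "backend-engineer" l i h1 h2 n5,
    pv_not_beq_slice "frontend-engineer" l i h1 h2 n6,
    pv_not_beq_slice "test-engineer" l i h1 h2 n7]

-- the target prefix length |k| lies in range(1, |l|+1) whenever k is a prefix of l and k ≠ ""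
theorem pv_mem_range (l : String) (k : String) (hpos : 1 ≤ k.toList.length)
    (h17 : k.toList.length ≤ 17)
    (hk : k.toList <+: l.toList) :
    ((k.toList.length : Int)) ∈ PySem.List.pyRange 1 (min (l.toList.length : Int) 17 + 1) 1 := by
  rw [PySem.List.mem_pyRange_one]
  have := hk.length_le
  omega

-- core: for any (lowercased) string, A's scan over the roles equals B's probe over the prefixes
theorem pv_core (l : String) :
    pvScanRoles l pvRoleBaselines =
      pvProbePrefixes l (PySem.List.pyRange 1 (min (l.toList.length : Int) 17 + 1) 1) := by
  by_cases h1 : "architect".toList <+: l.toList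
  · rw [pv_probe_hit l (("architect".toList.length : Int)) 8000 _
      (fun i hi => pv_hit_architect l i
        ((PySem.List.mem_pyRange_one).mp hi).1 (by have := (PySem.List.mem_pyRange_one).mp hi; omega) h1)
      (pv_mem_range l "architect" (by decide) (by decide) h1)]
    have h1' := h1
    simp at h1'
    simp [pvScanRoles, pvRoleBaselines, PySem.Str.startswith_eq, PySem.Chars.startswith_iff, h1']
  · by_cases h2 : "code-reviewer".toList <+: l.toList
    · rw [pv_probe_hit l (("code-reviewer".toList.length : Int)) 8000 _
        (fun i hi => pv_hit_code_reviewer l i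
          ((PySem.List.mem_pyRange_one).mp hi).1 (by have := (PySem.List.mem_pyRange_one).mp hi; omega) h2)
        (pv_mem_range l "code-reviewer" (by decide) (by decide) h2)]
      have h1' := h1; have h2' := h2
      simp at h1' h2'
      simp [pvScanRoles, pvRoleBaselines, PySem.Str.startswith_eq, PySem.Chars.startswith_iff, h1', h2']
    · by_cases h3 : "auditor".toList <+: l.toList
      · rw [pv_probe_hit l (("auditor".toList.length : Int)) 6000 _
          (fun i hi => pv_hit_auditor l i
            ((PySem.List.mem_pyRange_one).mp hi).1 (by have := (PySem.List.mem_pyRange_one).mp hi; omega) h3)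
          (pv_mem_range l "auditor" (by decide) (by decide) h3)]
        have h1' := h1; have h2' := h2; have h3' := h3
        simp at h1' h2' h3'
        simp [pvScanRoles, pvRoleBaselines, PySem.Str.startswith_eq, PySem.Chars.startswith_iff, h1', h2', h3']
      · by_cases h4 : "security-reviewer".toList <+: l.toList
        · rw [pv_probe_hit l (("security-reviewer".toList.length : Int)) 6000 _
            (fun i hi => pv_hit_security_reviewer l i
              ((PySem.List.mem_pyRange_one).mp hi).1 (by have := (PySem.List.mem_pyRange_one).mp hi; omega) h4)
            (pv_mem_range l "security-reviewer" (by decide) (by decide) h4)]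
          have h1' := h1; have h2' := h2; have h3' := h3; have h4' := h4
          simp at h1' h2' h3' h4'
          simp [pvScanRoles, pvRoleBaselines, PySem.Str.startswith_eq, PySem.Chars.startswith_iff,
            h1', h2', h3', h4']
        · by_cases h5 : "backend-engineer".toList <+: l.toList
          · rw [pv_probe_hit l (("backend-engineer".toList.length : Int)) 5000 _
              (fun i hi => pv_hit_backend_engineer l i
                ((PySem.List.mem_pyRange_one).mp hi).1 (by have := (PySem.List.mem_pyRange_one).mp hi; omega) h5)
              (pv_mem_range l "backend-engineer" (by decide) (by decide) h5)]
            have h1' := h1; have h2' := h2; have h3' := h3; have h4' := h4; have h5' := h5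
            simp at h1' h2' h3' h4' h5'
            simp [pvScanRoles, pvRoleBaselines, PySem.Str.startswith_eq, PySem.Chars.startswith_iff,
              h1', h2', h3', h4', h5']
          · by_cases h6 : "frontend-engineer".toList <+: l.toList
            · rw [pv_probe_hit l (("frontend-engineer".toList.length : Int)) 5000 _
                (fun i hi => pv_hit_frontend_engineer l i
                  ((PySem.List.mem_pyRange_one).mp hi).1 (by have := (PySem.List.mem_pyRange_one).mp hi; omega) h6)
                (pv_mem_range l "frontend-engineer" (by decide) (by decide) h6)]
              have h1' := h1; have h2' := h2; have h3' := h3; have h4' := h4; have h5' := h5; have h6' := h6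
              simp at h1' h2' h3' h4' h5' h6'
              simp [pvScanRoles, pvRoleBaselines, PySem.Str.startswith_eq, PySem.Chars.startswith_iff,
                h1', h2', h3', h4', h5', h6']
            · by_cases h7 : "test-engineer".toList <+: l.toList
              · rw [pv_probe_hit l (("test-engineer".toList.length : Int)) 5000 _
                  (fun i hi => pv_hit_test_engineer l i
                    ((PySem.List.mem_pyRange_one).mp hi).1 (by have := (PySem.List.mem_pyRange_one).mp hi; omega) h7)
                  (pv_mem_range l "test-engineer" (by decide) (by decide) h7)]
                have h1' := h1; have h2' := h2; have h3' := h3; have h4' := h4; have h5' := h5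
                have h6' := h6; have h7' := h7
                simp at h1' h2' h3' h4' h5' h6' h7'
                simp [pvScanRoles, pvRoleBaselines, PySem.Str.startswith_eq, PySem.Chars.startswith_iff,
                  h1', h2', h3', h4', h5', h6', h7']
              · rw [pv_probe_none l _
                  (fun i hi => pv_hit_none l i
                    ((PySem.List.mem_pyRange_one).mp hi).1 (by have := (PySem.List.mem_pyRange_one).mp hi; omega)
                    h1 h2 h3 h4 h5 h6 h7)]
                have h1' := h1; have h2' := h2; have h3' := h3; have h4' := h4; have h5' := h5
                have h6' := h6; have h7' := h7
                simp at h1' h2' h3' h4' h5' h6' h7'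
                simp [pvScanRoles, pvRoleBaselines, PySem.Str.startswith_eq, PySem.Chars.startswith_iff,
                  h1', h2', h3', h4', h5', h6', h7']

-- ===== VERDICT (by name: the statement is the Claim_ definition above) =====
theorem role_baseline_tokens_spec : Claim_equal_role_baseline_tokens := by
  intro agent_name _
  unfold Spec_role_baseline_tokens role_baseline_tokens role_baseline_tokens_alt
  by_cases h : agent_name = ""
  · subst h; decide
  · rw [if_neg h]
    simpa [show pvMaxRoleLen = (17 : Int) from by decide]
      using pv_core (PySem.Str.lower agent_name)
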